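-- pv_equiv track=rewrite | github.com/c-mita/AoC | 2023/19.py | passing_intervals
-- ===== SOURCE A (Python) =====
-- def passing_intervals(rules, start_rule):
--     key_idx_map = {"x":0, "m":1, "a":2, "s":3}
--
--     def evaluate_rule(interval, key):
--         if key == "A":
--             yield interval
--             return
--         elif key == "R":
--             return
--         for pattern in rules[key]:
--             if ":" not in pattern:
--                 yield from evaluate_rule(interval, pattern)
--                 return
--             subject, op = pattern[0], pattern[1]
--             value, target = pattern[2:].split(":")
--             value = int(value)
--             idx = key_idx_map[subject]
--             lx, hx = interval[idx][0], interval[idx][1]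
--             matching = None
--             if op == ">" and hx > value:
--                 matching = (max(lx, value+1), hx)
--                 unmatching = (min(lx, value), value)
--             if op == "<" and lx < value:
--                 matching = (lx, min(hx, value-1))
--                 unmatching = (value, max(hx, value))
--             if matching:
--                 matching_full = list(interval)
--                 matching_full[idx] = matching
--                 matching = tuple(matching_full)
--                 yield from evaluate_rule(matching, target)
--                 if unmatching[0] == unmatching[1]:
--                     return
--                 unmatching_full = list(interval)
--                 unmatching_full[idx] = unmatching
--                 unmatching = tuple(unmatching_full)
--                 interval = unmatching
--
--     start_interval = ((1, 4000),) * 4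
--     return list(evaluate_rule(start_interval, start_rule))
-- ===== SOURCE B (Python) =====
-- def passing_intervals(rules, start_rule):
--     key_idx_map = {"x": 0, "m": 1, "a": 2, "s": 3}
--
--     def frontier(interval, patterns):
--         # the (fragment, target) pairs this workflow dispatches, in rule order
--         out = []
--         for pattern in patterns:
--             if ":" not in pattern:
--                 out.append((interval, pattern))
--                 return out
--             subject, op = pattern[0], pattern[1]
--             value, target = pattern[2:].split(":")
--             value = int(value)
--             idx = key_idx_map[subject]
--             lx, hx = interval[idx]
--             matching = None
--             if op == ">" and hx > value:
--                 matching = (max(lx, value + 1), hx)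
--                 unmatching = (min(lx, value), value)
--             if op == "<" and lx < value:
--                 matching = (lx, min(hx, value - 1))
--                 unmatching = (value, max(hx, value))
--             if matching:
--                 frag = list(interval)
--                 frag[idx] = matching
--                 out.append((tuple(frag), target))
--                 if unmatching[0] == unmatching[1]:
--                     return out
--                 rest = list(interval)
--                 rest[idx] = unmatching
--                 interval = tuple(rest)
--         return out
--
--     results = []
--     stack = [(((1, 4000),) * 4, start_rule)]
--     while stack:
--         interval, key = stack.pop()
--         if key == "A":
--             results.append(interval)
--         elif key != "R":
--             stack.extend(reversed(frontier(interval, rules[key])))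
--     return results
-- ===== Notes on version B (the rewrite author's own statement) =====
-- stated objective: alternative
-- what changed: A's recursive generator over workflow rules is replaced by an iterative depth-first worklist: an explicit LIFO stack of (interval, workflow-key) frames whose expansion pushes each rule's (fragment, target) pairs in order, reproducing A's DFS preorder without recursion.
-- outside the precondition, e.g. on passing_intervals({'k': ['R'], 'j': ['j']}, 'k'): A returns [], B returns []
import Mathlib
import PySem

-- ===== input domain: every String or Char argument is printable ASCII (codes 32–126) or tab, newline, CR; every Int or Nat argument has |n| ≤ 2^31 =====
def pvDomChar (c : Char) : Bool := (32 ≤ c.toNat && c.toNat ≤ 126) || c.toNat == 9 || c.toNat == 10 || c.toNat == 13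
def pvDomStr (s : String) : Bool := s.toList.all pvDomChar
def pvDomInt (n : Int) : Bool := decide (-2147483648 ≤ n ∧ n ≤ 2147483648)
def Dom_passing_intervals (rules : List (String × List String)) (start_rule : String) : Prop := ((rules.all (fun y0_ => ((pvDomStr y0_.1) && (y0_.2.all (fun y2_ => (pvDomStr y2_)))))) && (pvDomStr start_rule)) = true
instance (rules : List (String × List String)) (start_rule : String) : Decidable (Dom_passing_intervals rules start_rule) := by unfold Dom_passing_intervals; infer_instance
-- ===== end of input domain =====

-- B replaces A's recursive generator by an explicit LIFO worklist of (interval, workflow-key)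
-- frames producing the same DFS preorder; equivalence is proved on well-formed acyclic rule
-- tables (Pre_ below), in any rule order.

-- Helpers shared by both ports: both Pythons run the identical parsing / clamping lines
-- ('subject, op = pattern[0], pattern[1]; value, target = pattern[2:].split(":"); …').
def pvKeyIdx (c : Char) : Option Nat :=
  if c = 'x' then some 0 else if c = 'm' then some 1
  else if c = 'a' then some 2 else if c = 's' then some 3 else none

-- none exactly where the Python lines raise (IndexError / ValueError / KeyError)
def pvParsePat (p : String) : Option (Nat × Char × Int × String) :=
  match p.toList with
  | c0 :: c1 :: rest =>
    match PySem.Chars.splitOn rest [':'] with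
    | [v, t] =>
      match PySem.Int.ofChars? v, pvKeyIdx c0 with
      | some value, some idx => some (idx, c1, value, String.ofList t)
      | _, _ => none
    | _ => none
  | _ => none

-- the 'matching'/'unmatching' pair, none when neither clamped branch fires
def pvMatch (iv : List (Int × Int)) (idx : Nat) (op : Char) (value : Int) :
    Option ((Int × Int) × (Int × Int)) :=
  let lx := (iv.getD idx (0, 0)).1
  let hx := (iv.getD idx (0, 0)).2
  if op = '>' ∧ hx > value then some ((max lx (value + 1), hx), (min lx value, value))
  else if op = '<' ∧ lx < value then some ((lx, min hx (value - 1)), (value, max hx value))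
  else none

def pvStart : List (Int × Int) := [(1, 4000), (1, 4000), (1, 4000), (1, 4000)]

-- ===== PORT A =====
-- A's recursive generator 'evaluate_rule' (fuel only guards the recursion; it never runs out
-- on inputs satisfying Pre_, where the rule graph is acyclic).
mutual
def pvEvalA (rules : List (String × List String)) :
    Nat → List (Int × Int) → String → Option (List (List (Int × Int)))
  | 0, _, _ => none
  | n + 1, iv, key =>
    if key = "A" then some [iv]
    else if key = "R" then some []
    else
      match List.lookup key rules with
      | none => none                       -- Python: KeyError
      | some pats => pvGoA rules n iv pats
  termination_by fuel _ _ => (fuel, 0)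

def pvGoA (rules : List (String × List String)) :
    Nat → List (Int × Int) → List String → Option (List (List (Int × Int)))
  | _, _, [] => some []
  | n, iv, p :: ps =>
    if p.toList.contains ':' = false then pvEvalA rules n iv p
    else
      match pvParsePat p with
      | none => none                       -- Python: raise while parsing the pattern
      | some (idx, op, value, target) =>
        match pvMatch iv idx op value with
        | none => pvGoA rules n iv ps
        | some (mi, um) =>
          match pvEvalA rules n (iv.set idx mi) target with
          | none => none
          | some r1 =>
            if um.1 = um.2 then some r1
            else
              match pvGoA rules n (iv.set idx um) ps with
              | none => none
              | some r2 => some (r1 ++ r2)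
  termination_by fuel _ ps => (fuel, ps.length + 1)
end

def passing_intervals (rules : List (String × List String)) (start_rule : String) :
    List (List (Int × Int)) :=
  (pvEvalA rules (rules.length + 2) pvStart start_rule).getD []

-- ===== PORT B =====
-- Source B's 'frontier': the (fragment, target) pairs one workflow dispatches, in rule order
def pvFrontier : List (Int × Int) → List String → List (List (Int × Int) × String)
  | _, [] => []
  | iv, p :: ps =>
    if p.toList.contains ':' = false then [(iv, p)]
    else
      match pvParsePat p with
      | none => []                         -- Python B raises here; unreachable under Pre_
      | some (idx, op, value, target) =>
        match pvMatch iv idx op value with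
        | none => pvFrontier iv ps
        | some (mi, um) =>
          (iv.set idx mi, target) :: (if um.1 = um.2 then [] else pvFrontier (iv.set idx um) ps)

-- Source B's while loop.  The Lean list's HEAD is the Python stack's END (the pop side), so
-- 'stack.extend(reversed(frontier(…)))' is 'pvFrontier iv pats ++ rest'.  Fuel only guards
-- termination; the chosen budget is sufficient on every input satisfying Pre_.
def pvLoop (rules : List (String × List String)) :
    Nat → List (List (Int × Int) × String) → List (List (Int × Int)) →
    Option (List (List (Int × Int)))
  | 0, _, _ => none
  | _ + 1, [], acc => some acc
  | n + 1, (iv, key) :: rest, acc =>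
    if key = "A" then pvLoop rules n rest (acc ++ [iv])
    else if key = "R" then pvLoop rules n rest acc
    else
      match List.lookup key rules with
      | none => none                       -- Python: KeyError
      | some pats => pvLoop rules n (pvFrontier iv pats ++ rest) acc

def pvMaxPats (rules : List (String × List String)) : Nat :=
  rules.foldl (fun m r => max m r.2.length) 0

def passing_intervals_alt (rules : List (String × List String)) (start_rule : String) :
    List (List (Int × Int)) :=
  (pvLoop rules ((pvMaxPats rules + 1) ^ (rules.length + 2) + 1) [(pvStart, start_rule)] []).getD []

-- ===== PRECONDITION & SPEC =====
def pvIsTarget (rs : List (String × List String)) (k : String) : Bool :=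
  k == "A" || k == "R" || (rs.map Prod.fst).contains k

def pvPatOK (rs : List (String × List String)) (p : String) : Bool :=
  if p.toList.contains ':' = false then pvIsTarget rs p
  else
    match pvParsePat p with
    | none => false
    | some (_, _, _, t) => pvIsTarget rs t

def pvOK (rs : List (String × List String)) : Bool :=
  rs.all (fun r => r.2.all (pvPatOK rs))

-- the keys a pattern / a workflow dispatches to
def pvPatTargets (p : String) : List String :=
  if p.toList.contains ':' = false then [p]
  else
    match pvParsePat p with
    | none => []
    | some (_, _, _, t) => [t]

def pvSuccs (rules : List (String × List String)) (k : String) : List String :=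
  match List.lookup k rules with
  | none => []
  | some pats => pats.flatMap pvPatTargets

-- keys reachable from k in 1..n dispatch steps
def pvReachN (rules : List (String × List String)) : Nat → String → List String
  | 0, _ => []
  | n + 1, k => ((pvSuccs rules k).flatMap (fun s => s :: pvReachN rules n s)).dedup

def pvAcyclic (rules : List (String × List String)) : Bool :=
  (rules.map Prod.fst).all (fun k => !(pvReachN rules rules.length k).contains k)

-- Pre_ admits the well-formed acyclic workflow tables in ANY rule order: either the start key
-- is terminal, or every pattern of every rule parses, every target is "A"/"R" or a key of the
-- table, keys are pairwise distinct (duplicate keys are a dict-vs-association-list corner),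
-- and no key can dispatch back to itself.  This excludes the inputs where A raises (KeyError /
-- ValueError / IndexError, or unbounded recursion on a cyclic table); because reachability
-- from start_rule is not a closed-form shape condition, it also narrows away tables whose only
-- defects (bad patterns, cycles, patterns after a default rule) are never reached by A.
def Pre_passing_intervals (rules : List (String × List String)) (start_rule : String) : Prop :=
  start_rule = "A" ∨ start_rule = "R" ∨
    (pvIsTarget rules start_rule = true ∧ (rules.map Prod.fst).Nodup ∧
      pvOK rules = true ∧ pvAcyclic rules = true)

instance (rules : List (String × List String)) (start_rule : String) :
    Decidable (Pre_passing_intervals rules start_rule) := by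
  unfold Pre_passing_intervals; infer_instance

def pvWitness_passing_intervals : (List (String × List String)) × String :=
  ([("in", ["x<1000:A", "m>5:qq", "R"]), ("qq", ["s>2000:A", "R"])], "in")

def Spec_passing_intervals (rules : List (String × List String)) (start_rule : String)
    (out : List (List (Int × Int))) : Prop := out = passing_intervals_alt rules start_rule

instance (rules : List (String × List String)) (start_rule : String)
    (out : List (List (Int × Int))) : Decidable (Spec_passing_intervals rules start_rule out) := by
  unfold Spec_passing_intervals; infer_instance

-- ===== CLAIM (what is proved, stated in full; the proofs are below) =====
def Claim_equal_passing_intervals : Prop :=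
  ∀ (rules : List (String × List String)) (start_rule : String),
    Dom_passing_intervals rules start_rule → Pre_passing_intervals rules start_rule →
      Spec_passing_intervals rules start_rule (passing_intervals rules start_rule)

-- ===== LEMMAS AND PROOFS =====

theorem pv_lookup_mem (rules : List (String × List String)) (k : String)
    (pats : List String) (h : List.lookup k rules = some pats) : (k, pats) ∈ rules := by
  induction rules with
  | nil => simp [List.lookup] at h
  | cons hd tl ih =>
    obtain ⟨kh, vh⟩ := hd
    rw [List.lookup_cons] at h
    by_cases hkh : (k == kh) = true
    · simp only [hkh, Option.some.injEq] at h
      simp at hkh; subst hkh; subst h; exact .head _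
    · simp only [hkh] at h
      exact .tail _ (ih h)

theorem pv_lookup_of_mem_fst (rules : List (String × List String)) (k : String)
    (h : k ∈ rules.map Prod.fst) : ∃ pats, List.lookup k rules = some pats := by
  induction rules with
  | nil => simp at h
  | cons hd tl ih =>
    obtain ⟨kh, vh⟩ := hd
    by_cases hkh : (k == kh) = true
    · exact ⟨vh, by rw [List.lookup_cons]; simp only [hkh]⟩
    · have hf : (k == kh) = false := by simpa using hkh
      rw [List.lookup_cons]
      simp only [hf]
      have h' : k = kh ∨ ∃ x, (k, x) ∈ tl := by simpa using h
      rcases h' with h' | ⟨x, hx⟩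
      · exact absurd h' (by simpa using hkh)
      · exact ih (List.mem_map.mpr ⟨(k, x), hx, rfl⟩)

theorem pv_lookup_len_le (rules : List (String × List String)) (k : String)
    (pats : List String) (h : List.lookup k rules = some pats) :
    pats.length ≤ pvMaxPats rules :=
  (PySem.List.le_foldl_max_nat rules (fun r => r.2.length) 0).2 _ (pv_lookup_mem rules k pats h)

theorem pv_loop_mono (rules : List (String × List String)) :
    ∀ f s a r, pvLoop rules f s a = some r → pvLoop rules (f + 1) s a = some r := by
  intro f
  induction f with
  | zero => intro s a r h; simp [pvLoop] at h
  | succ n ih =>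
    intro s a r h
    match s with
    | [] => simpa [pvLoop] using h
    | (iv, key) :: rest =>
      rw [pvLoop] at h
      rw [pvLoop]
      split_ifs at h ⊢ with h1 h2
      · exact ih _ _ _ h
      · exact ih _ _ _ h
      · cases hl : List.lookup key rules with
        | none => simp only [hl] at h; exact absurd h (by simp)
        | some pats => simp only [hl] at h; exact ih _ _ _ h

theorem pv_loop_mono_le (rules : List (String × List String)) {f f' : Nat}
    (hle : f ≤ f') : ∀ s a r, pvLoop rules f s a = some r → pvLoop rules f' s a = some r := by
  induction hle with
  | refl => intro s a r h; exact h
  | step _ ih => intro s a r h; exact pv_loop_mono rules _ _ _ _ (ih s a r h)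

-- t is reachable in n+1 steps iff it is a successor or reachable from a successor in n steps
theorem pv_mem_reach_succ (rules : List (String × List String)) (n : Nat) (k t : String) :
    t ∈ pvReachN rules (n + 1) k ↔
      ∃ s ∈ pvSuccs rules k, t = s ∨ t ∈ pvReachN rules n s := by
  rw [pvReachN]
  simp

theorem pv_reach_mono_one (rules : List (String × List String)) :
    ∀ n k, pvReachN rules n k ⊆ pvReachN rules (n + 1) k := by
  intro n
  induction n with
  | zero => intro k t ht; simp [pvReachN] at ht
  | succ m ih =>
    intro k t ht
    rw [pv_mem_reach_succ] at ht ⊢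
    obtain ⟨s, hs, hts⟩ := ht
    rcases hts with h | h
    · exact ⟨s, hs, Or.inl h⟩
    · exact ⟨s, hs, Or.inr (ih s h)⟩

theorem pv_reach_mono (rules : List (String × List String)) {m n : Nat} (hle : m ≤ n)
    (k : String) : pvReachN rules m k ⊆ pvReachN rules n k := by
  induction hle with
  | refl => exact fun _ h => h
  | step _ ih => exact fun t ht => pv_reach_mono_one rules _ _ (ih ht)

-- a dispatch chain a :: l ++ [b] puts b within l.length+1 reachability steps of a
theorem pv_chain_reach (rules : List (String × List String)) :
    ∀ (l : List String) (a b : String),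
      List.IsChain (fun x y => y ∈ pvSuccs rules x) (a :: (l ++ [b])) →
      b ∈ pvReachN rules (l.length + 1) a := by
  intro l
  induction l with
  | nil =>
    intro a b h
    rw [List.nil_append, List.isChain_cons_cons] at h
    rw [pv_mem_reach_succ]
    exact ⟨b, h.1, Or.inl rfl⟩
  | cons x l' ih =>
    intro a b h
    rw [List.cons_append, List.isChain_cons_cons] at h
    have hb := ih x b h.2
    rw [pv_mem_reach_succ]
    exact ⟨x, h.1, Or.inr (pv_reach_mono rules (by simp) x hb)⟩

theorem pv_target_form (rs : List (String × List String)) (q : String)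
    (h : pvIsTarget rs q = true) : q = "A" ∨ q = "R" ∨ q ∈ rs.map Prod.fst := by
  rw [pvIsTarget] at h
  have h' : (q = "A" ∨ q = "R") ∨ ∃ x, (q, x) ∈ rs := by simpa using h
  rcases h' with (h1 | h1) | ⟨x, hx⟩
  · exact Or.inl h1
  · exact Or.inr (Or.inl h1)
  · exact Or.inr (Or.inr (List.mem_map.mpr ⟨(q, x), hx, rfl⟩))

-- Termination of A's recursion on acyclic tables: the chain of keys on the call path never
-- repeats, so fuel rules.length + 2 suffices.
theorem pv_succ (rules : List (String × List String))
    (hok : pvOK rules = true) (hacy : pvAcyclic rules = true) :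
    ∀ m (V : List String) k iv,
      List.IsChain (fun x y => y ∈ pvSuccs rules x) (V ++ [k]) →
      (V ++ [k]).Nodup →
      (∀ v ∈ V ++ [k], v ∈ rules.map Prod.fst) →
      rules.length + 2 ≤ m + V.length + 1 →
      ∃ r, pvEvalA rules m iv k = some r := by
  intro m
  induction m with
  | zero =>
    intro V k iv _ hnodup hmem hfuel
    have hsub : (V ++ [k]) ⊆ rules.map Prod.fst := fun v hv => hmem v hv
    have hle := (List.subperm_of_subset hnodup hsub).length_le
    simp [List.length_append] at hle
    simp at hfuel
    omega
  | succ n ih =>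
    intro V k iv hchain hnodup hmem hfuel
    by_cases hA : k = "A"
    · exact ⟨[iv], by rw [pvEvalA, if_pos hA]⟩
    by_cases hR : k = "R"
    · exact ⟨[], by rw [pvEvalA, if_neg hA, if_pos hR]⟩
    have hkkeys : k ∈ rules.map Prod.fst := hmem k (by simp)
    obtain ⟨pats, hlk⟩ := pv_lookup_of_mem_fst rules k hkkeys
    have hlen : (V ++ [k]).length ≤ rules.length := by
      have hsub : (V ++ [k]) ⊆ rules.map Prod.fst := fun v hv => hmem v hv
      have := (List.subperm_of_subset hnodup hsub).length_le
      simpa using this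
    have hVlen : V.length + 1 ≤ rules.length := by simpa using hlen
    -- patterns of this rule are well-formed
    have hpats : ∀ p ∈ pats, pvPatOK rules p = true := by
      have hmemr := pv_lookup_mem rules k pats hlk
      rw [pvOK, List.all_eq_true] at hok
      have := hok (k, pats) hmemr
      rw [List.all_eq_true] at this
      exact this
    -- every pattern target of this rule is a successor of k
    have hsucc : ∀ p ∈ pats, ∀ t ∈ pvPatTargets p, t ∈ pvSuccs rules k := by
      intro p hp t ht
      rw [pvSuccs, hlk]
      exact List.mem_flatMap.mpr ⟨p, hp, ht⟩
    -- one recursive dispatch to a valid successor target always returns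
    have recur : ∀ t, t ∈ pvSuccs rules k → pvIsTarget rules t = true →
        ∀ iv', ∃ r, pvEvalA rules n iv' t = some r := by
      intro t hts htok iv'
      have hn1 : 1 ≤ n := by omega
      rcases pv_target_form rules t htok with h | h | h
      · obtain ⟨n', rfl⟩ := Nat.exists_eq_add_of_le' hn1
        exact ⟨[iv'], by rw [pvEvalA, if_pos h]⟩
      · obtain ⟨n', rfl⟩ := Nat.exists_eq_add_of_le' hn1
        refine ⟨[], ?_⟩
        rw [pvEvalA, if_neg (by subst h; decide), if_pos h]
      · -- t is a key; it cannot already be on the call path (that would be a cycle)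
        have hchain' : List.IsChain (fun x y => y ∈ pvSuccs rules x) ((V ++ [k]) ++ [t]) := by
          rw [List.isChain_append]
          refine ⟨hchain, by simp, ?_⟩
          intro x hx y hy
          simp at hy
          subst hy
          have : (V ++ [k]).getLast? = some k := by simp
          rw [this] at hx
          simp at hx
          subst hx
          exact hts
        by_cases htV : t ∈ V ++ [k]
        · exfalso
          obtain ⟨l1, l2, hdec⟩ := List.append_of_mem htV
          have hchain2 : List.IsChain (fun x y => y ∈ pvSuccs rules x) (t :: (l2 ++ [t])) := by
            have : (V ++ [k]) ++ [t] = l1 ++ (t :: (l2 ++ [t])) := by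
              rw [hdec]; simp
            rw [this] at hchain'
            exact hchain'.right_of_append
          have hcyc := pv_chain_reach rules l2 t t hchain2
          have hl2 : l2.length + 1 ≤ rules.length := by
            have : (V ++ [k]).length = l1.length + (l2.length + 1) := by rw [hdec]; simp
            omega
          have hcycL : t ∈ pvReachN rules rules.length t :=
            pv_reach_mono rules hl2 t hcyc
          rw [pvAcyclic, List.all_eq_true] at hacy
          have := hacy t h
          simp at this
          exact this hcycL
        · have hnodup' : ((V ++ [k]) ++ [t]).Nodup := by
            rw [List.nodup_append]
            refine ⟨hnodup, List.nodup_singleton t, fun a ha b hb => ?_⟩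
            simp at hb
            subst hb
            exact fun h' => htV (h' ▸ ha)
          have hmem' : ∀ v ∈ (V ++ [k]) ++ [t], v ∈ rules.map Prod.fst := by
            intro v hv
            rcases List.mem_append.mp hv with hv | hv
            · exact hmem v hv
            · simp at hv; subst hv; exact h
          have := ih (V ++ [k]) t iv' hchain' hnodup' hmem' (by simp; omega)
          exact this
    -- the scan over the rule's patterns returns
    have gos : ∀ ps iv',
        (∀ p ∈ ps, pvPatOK rules p = true ∧ (∀ t ∈ pvPatTargets p, t ∈ pvSuccs rules k)) →
        ∃ r, pvGoA rules n iv' ps = some r := by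
      intro ps
      induction ps with
      | nil => exact fun iv' _ => ⟨[], by rw [pvGoA]⟩
      | cons p ps ihp =>
        intro iv' hall
        obtain ⟨hpok, hptg⟩ := hall p (by simp)
        have hall' : ∀ q ∈ ps, pvPatOK rules q = true ∧
            (∀ t ∈ pvPatTargets q, t ∈ pvSuccs rules k) := fun q hq => hall q (by simp [hq])
        rw [pvPatOK] at hpok
        by_cases hcol : p.toList.contains ':' = false
        · rw [if_pos hcol] at hpok
          have hpt : p ∈ pvSuccs rules k := hptg p (by rw [pvPatTargets, if_pos hcol]; simp)
          obtain ⟨r, hr⟩ := recur p hpt hpok iv'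
          exact ⟨r, by rw [pvGoA, if_pos hcol]; exact hr⟩
        · rw [if_neg hcol] at hpok
          cases hpp : pvParsePat p with
          | none => rw [hpp] at hpok; exact absurd hpok (by simp)
          | some q =>
            obtain ⟨idx, opc, value, target⟩ := q
            simp only [hpp] at hpok
            have htgt : target ∈ pvSuccs rules k :=
              hptg target (by rw [pvPatTargets, if_neg hcol, hpp]; simp)
            cases hm : pvMatch iv' idx opc value with
            | none =>
              obtain ⟨r, hr⟩ := ihp iv' hall'
              exact ⟨r, by rw [pvGoA, if_neg hcol]; simp only [hpp, hm]; exact hr⟩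
            | some mu =>
              obtain ⟨mi, um⟩ := mu
              obtain ⟨r1, hr1⟩ := recur target htgt hpok (iv'.set idx mi)
              by_cases hdeg : um.1 = um.2
              · exact ⟨r1, by
                  rw [pvGoA, if_neg hcol]; simp only [hpp, hm, hr1, if_pos hdeg]⟩
              · obtain ⟨r2, hr2⟩ := ihp (iv'.set idx um) hall'
                exact ⟨r1 ++ r2, by
                  rw [pvGoA, if_neg hcol]; simp only [hpp, hm, hr1, hr2, if_neg hdeg]⟩
    obtain ⟨r, hr⟩ := gos pats iv (fun p hp => ⟨hpats p hp, hsucc p hp⟩)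
    exact ⟨r, by rw [pvEvalA, if_neg hA, if_neg hR]; simp only [hlk]; exact hr⟩

-- The simulation: one evaluated frame of A equals pushing its frontier on B's stack, with a
-- fuel cost bounded by (maxPats+1)^fuel.
theorem pv_step (rules : List (String × List String)) :
    ∀ m iv k r, pvEvalA rules m iv k = some r →
      ∃ c, c ≤ (pvMaxPats rules + 1) ^ m ∧
        ∀ fuel rest acc, pvLoop rules (c + fuel) ((iv, k) :: rest) acc
          = pvLoop rules fuel rest (acc ++ r) := by
  intro m
  induction m with
  | zero => intro iv k r h; rw [pvEvalA] at h; exact absurd h (by simp)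
  | succ n ih =>
    have hX : 0 < (pvMaxPats rules + 1) ^ n := pow_pos (by omega) n
    have gostep : ∀ ps iv r, pvGoA rules n iv ps = some r →
        ∃ c, c ≤ ps.length * (pvMaxPats rules + 1) ^ n ∧
          ∀ fuel rest acc, pvLoop rules (c + fuel) (pvFrontier iv ps ++ rest) acc
            = pvLoop rules fuel rest (acc ++ r) := by
      intro ps
      induction ps with
      | nil =>
        intro iv r h
        rw [pvGoA] at h
        obtain rfl : ([] : List (List (Int × Int))) = r := by simpa using h
        exact ⟨0, by simp, fun fuel rest acc => by simp [pvFrontier]⟩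
      | cons p ps ihps =>
        intro iv r h
        rw [pvGoA] at h
        by_cases hc : p.toList.contains ':' = false
        · rw [if_pos hc] at h
          obtain ⟨c, hcle, heq⟩ := ih iv p r h
          refine ⟨c, ?_, fun fuel rest acc => ?_⟩
          · calc c ≤ (pvMaxPats rules + 1) ^ n := hcle
              _ ≤ (p :: ps).length * (pvMaxPats rules + 1) ^ n :=
                Nat.le_mul_of_pos_left _ (by simp)
          · have hf : pvFrontier iv (p :: ps) = [(iv, p)] := by rw [pvFrontier, if_pos hc]
            rw [hf]
            simpa using heq fuel rest acc
        · rw [if_neg hc] at h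
          have hf0 : pvFrontier iv (p :: ps)
              = (match pvParsePat p with
                 | none => []
                 | some (idx, op, value, target) =>
                   match pvMatch iv idx op value with
                   | none => pvFrontier iv ps
                   | some (mi, um) =>
                     (iv.set idx mi, target) ::
                       (if um.1 = um.2 then [] else pvFrontier (iv.set idx um) ps)) := by
            rw [pvFrontier, if_neg hc]
          cases hp : pvParsePat p with
          | none => simp only [hp] at h; exact absurd h (by simp)
          | some q =>
            obtain ⟨idx, op, value, target⟩ := q
            simp only [hp] at h hf0
            cases hm : pvMatch iv idx op value with
            | none =>
              simp only [hm] at h hf0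
              obtain ⟨c, hcle, heq⟩ := ihps iv r h
              refine ⟨c, ?_, fun fuel rest acc => ?_⟩
              · calc c ≤ ps.length * (pvMaxPats rules + 1) ^ n := hcle
                  _ ≤ (p :: ps).length * (pvMaxPats rules + 1) ^ n := by
                    simp only [List.length_cons]
                    exact Nat.mul_le_mul_right _ (by omega)
              · rw [hf0]; exact heq fuel rest acc
            | some mu =>
              obtain ⟨mi, um⟩ := mu
              simp only [hm] at h hf0
              cases he : pvEvalA rules n (iv.set idx mi) target with
              | none => simp only [he] at h; exact absurd h (by simp)
              | some r1 =>
                simp only [he] at h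
                obtain ⟨c1, hc1, heq1⟩ := ih _ _ _ he
                by_cases hdeg : um.1 = um.2
                · rw [if_pos hdeg] at h hf0
                  obtain rfl : r1 = r := by simpa using h
                  refine ⟨c1, ?_, fun fuel rest acc => ?_⟩
                  · calc c1 ≤ (pvMaxPats rules + 1) ^ n := hc1
                      _ ≤ (p :: ps).length * (pvMaxPats rules + 1) ^ n :=
                        Nat.le_mul_of_pos_left _ (by simp)
                  · rw [hf0]
                    simpa using heq1 fuel rest acc
                · rw [if_neg hdeg] at h hf0
                  cases hg : pvGoA rules n (iv.set idx um) ps with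
                  | none => simp only [hg] at h; exact absurd h (by simp)
                  | some r2 =>
                    simp only [hg] at h
                    obtain rfl : r1 ++ r2 = r := by simpa using h
                    obtain ⟨c2, hc2, heq2⟩ := ihps _ _ hg
                    refine ⟨c1 + c2, ?_, fun fuel rest acc => ?_⟩
                    · have : (p :: ps).length * (pvMaxPats rules + 1) ^ n
                          = ps.length * (pvMaxPats rules + 1) ^ n
                            + (pvMaxPats rules + 1) ^ n := by
                        simp [List.length_cons, Nat.succ_mul]
                      omega
                    · rw [hf0, List.cons_append]
                      have e1 : c1 + c2 + fuel = c1 + (c2 + fuel) := by omega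
                      rw [e1, heq1 (c2 + fuel) (pvFrontier (iv.set idx um) ps ++ rest) acc,
                        heq2 fuel rest (acc ++ r1), List.append_assoc]
    intro iv k r h
    rw [pvEvalA] at h
    by_cases hA : k = "A"
    · rw [if_pos hA] at h
      obtain rfl : [iv] = r := by simpa using h
      refine ⟨1, Nat.one_le_pow _ _ (by omega), fun fuel rest acc => ?_⟩
      rw [Nat.add_comm 1 fuel, pvLoop, if_pos hA]
    · rw [if_neg hA] at h
      by_cases hR : k = "R"
      · rw [if_pos hR] at h
        obtain rfl : ([] : List (List (Int × Int))) = r := by simpa using h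
        refine ⟨1, Nat.one_le_pow _ _ (by omega), fun fuel rest acc => ?_⟩
        rw [Nat.add_comm 1 fuel, pvLoop, if_neg hA, if_pos hR, List.append_nil]
      · rw [if_neg hR] at h
        cases hl : List.lookup k rules with
        | none => simp only [hl] at h; exact absurd h (by simp)
        | some pats =>
          simp only [hl] at h
          obtain ⟨c, hcle, heq⟩ := gostep pats iv r h
          have hplen := pv_lookup_len_le rules k pats hl
          refine ⟨c + 1, ?_, fun fuel rest acc => ?_⟩
          · have e : (pvMaxPats rules + 1) ^ (n + 1)
                = pvMaxPats rules * (pvMaxPats rules + 1) ^ n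
                  + (pvMaxPats rules + 1) ^ n := by
              rw [pow_succ]; ring
            have : pats.length * (pvMaxPats rules + 1) ^ n
                ≤ pvMaxPats rules * (pvMaxPats rules + 1) ^ n :=
              Nat.mul_le_mul_right _ hplen
            omega
          · have e1 : c + 1 + fuel = (c + fuel) + 1 := by omega
            rw [e1, pvLoop, if_neg hA, if_neg hR, hl]
            exact heq fuel rest acc

-- ===== VERDICT (by name: the statement is the Claim_ definition above) =====
theorem passing_intervals_spec : Claim_equal_passing_intervals := by
  intro rules start _hdom hpre
  unfold Spec_passing_intervals passing_intervals passing_intervals_alt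
  have hsome : ∃ r, pvEvalA rules (rules.length + 2) pvStart start = some r := by
    rcases hpre with hA | hR | ⟨htgt, _hnd, hok, hacy⟩
    · exact ⟨[pvStart], by rw [pvEvalA, if_pos hA]⟩
    · refine ⟨[], ?_⟩
      rw [pvEvalA, if_neg (by subst hR; decide), if_pos hR]
    · rcases pv_target_form rules start htgt with hA | hR | hk
      · exact ⟨[pvStart], by rw [pvEvalA, if_pos hA]⟩
      · refine ⟨[], ?_⟩
        rw [pvEvalA, if_neg (by subst hR; decide), if_pos hR]
      · exact pv_succ rules hok hacy (rules.length + 2) [] start pvStart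
          (by simp) (by simp) (by simpa using hk) (by simp)
  obtain ⟨r, hr⟩ := hsome
  obtain ⟨c, hc, heq⟩ := pv_step rules _ _ _ _ hr
  have h1 : pvLoop rules (c + 1) [(pvStart, start)] [] = some r := by
    rw [heq 1 [] []]
    simp [pvLoop]
  have h2 : pvLoop rules ((pvMaxPats rules + 1) ^ (rules.length + 2) + 1)
      [(pvStart, start)] [] = some r :=
    pv_loop_mono_le rules (by omega) _ _ _ h1
  rw [hr, h2]
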